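-- pv_equiv track=rewrite | github.com/xsj0609/data_science | ScoreCard/04_xigua/scorecard_03_chi.py | value2bin
-- ===== SOURCE A (Python) =====
-- def value2bin(x,cutoffs):
--     '''
--     将变量的值转换成相应的组。
--     x: 需要转换到分组的值
--     cutoffs: 各组的起始值。
--     return: x对应的组，如group1。从group1开始。
--     '''
--     #切分点从小到大排序。
--     cutoffs = sorted(cutoffs)
--     num_groups = len(cutoffs)
--     #异常情况：小于第一组的起始值。这里直接放到第一组。
--     #异常值建议在分组之前先处理妥善。
--     if x < cutoffs[0]:
--         return 'bin1'
--     for i in range(1,num_groups):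
--         if cutoffs[i-1] <= x < cutoffs[i]:
--             return 'bin{}'.format(i)
--     #最后一组，也可能会包括一些非常大的异常值。
--     return 'bin{}'.format(num_groups)
-- ===== SOURCE B (Python) =====
-- def value2bin(x, cutoffs):
--     # Bin index = number of cutoffs <= x, clamped to bin1 below the minimum.
--     # No sorting needed: the count is order-independent.
--     if x < min(cutoffs):
--         return 'bin1'
--     return 'bin{}'.format(sum(1 for c in cutoffs if c <= x))
-- ===== Notes on version B (the rewrite author's own statement) =====
-- stated objective: faster
-- what changed: Drops the sort and the interval scan entirely: the bin index is the order-independent count of cutoffs <= x (with the same below-minimum clamp to bin1), computed in one pass over the unsorted list.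
import Mathlib
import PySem

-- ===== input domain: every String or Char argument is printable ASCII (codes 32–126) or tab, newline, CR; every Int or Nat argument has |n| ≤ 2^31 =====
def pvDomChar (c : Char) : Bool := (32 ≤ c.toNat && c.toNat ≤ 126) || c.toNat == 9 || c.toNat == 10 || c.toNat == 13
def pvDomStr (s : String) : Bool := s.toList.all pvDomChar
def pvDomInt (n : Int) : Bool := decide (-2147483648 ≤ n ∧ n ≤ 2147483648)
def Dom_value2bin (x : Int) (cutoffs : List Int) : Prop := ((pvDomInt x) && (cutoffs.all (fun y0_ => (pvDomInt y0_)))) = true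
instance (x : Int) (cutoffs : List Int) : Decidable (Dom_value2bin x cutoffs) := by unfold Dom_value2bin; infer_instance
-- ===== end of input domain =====

-- B replaces A's sort + linear interval scan by a single unsorted counting pass (bin index = #cutoffs ≤ x); return values proved equal on nonempty cutoffs.

-- ===== PORT A =====
-- 'for i in range(1, num_groups): if cutoffs[i-1] <= x < cutoffs[i]: return ...' — early return as Option
def value2binLoop (s : List Int) (x : Int) : List Int → Option String
  | [] => none
  | i :: rest =>
      if PySem.List.pyGetD s (i - 1) 0 ≤ x ∧ x < PySem.List.pyGetD s i 0 then
        some ("bin" ++ PySem.Int.toStr i)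
      else value2binLoop s x rest

def value2bin (x : Int) (cutoffs : List Int) : String :=
  let s := PySem.List.sorted cutoffs (fun c => c) false
  let numGroups : Int := s.length
  match PySem.List.pyGet? s 0 with
  | none => ""   -- cutoffs = []: Python raises IndexError here; excluded by Pre_
  | some c0 =>
    if x < c0 then "bin1"
    else
      match value2binLoop s x (PySem.List.pyRange 1 numGroups) with
      | some r => r
      | none => "bin" ++ PySem.Int.toStr numGroups

-- ===== PORT B =====
def value2bin_alt (x : Int) (cutoffs : List Int) : String :=
  match PySem.List.min? cutoffs (fun c => c) with
  | none => ""   -- min([]) raises ValueError; excluded by Pre_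
  | some m =>
    if x < m then "bin1"
    else "bin" ++ PySem.Int.toStr ((cutoffs.countP (fun c => decide (c ≤ x)) : Int))

-- ===== PRECONDITION & SPEC =====
-- Pre_ excludes only the empty cutoff list, on which both Pythons raise (A: IndexError, B: ValueError).
def Pre_value2bin (x : Int) (cutoffs : List Int) : Prop := cutoffs ≠ []
instance (x : Int) (cutoffs : List Int) : Decidable (Pre_value2bin x cutoffs) := by unfold Pre_value2bin; infer_instance
def pvWitness_value2bin : Int × List Int := (5, [1, 3, 7])

def Spec_value2bin (x : Int) (cutoffs : List Int) (out : String) : Prop := out = value2bin_alt x cutoffs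
instance (x : Int) (cutoffs : List Int) (out : String) : Decidable (Spec_value2bin x cutoffs out) := by unfold Spec_value2bin; infer_instance

-- ===== CLAIM (what is proved, stated in full; the proofs are below) =====
def Claim_equal_value2bin : Prop := ∀ (x : Int) (cutoffs : List Int), Dom_value2bin x cutoffs → Pre_value2bin x cutoffs → Spec_value2bin x cutoffs (value2bin x cutoffs)

-- ===== LEMMAS AND PROOFS =====

-- On a (≤)-sorted list, "s[j] ≤ x" holds exactly for the first countP-many positions.
lemma sorted_le_iff_lt_countP (x : Int) :
    ∀ (s : List Int), s.Pairwise (· ≤ ·) → ∀ (j : Nat) (hj : j < s.length),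
      (s[j] ≤ x ↔ j < s.countP (fun c => decide (c ≤ x))) := by
  intro s
  induction s with
  | nil => intro _ j hj; simp at hj
  | cons a t ih =>
    intro hp j hj
    obtain ⟨ha, hpt⟩ := List.pairwise_cons.mp hp
    by_cases hax : a ≤ x
    · cases j with
      | zero => simp [hax]
      | succ j =>
        have hjt : j < t.length := by simpa using hj
        have := ih hpt j hjt
        simp [hax, this]
    · have hcnt0 : t.countP (fun c => decide (c ≤ x)) = 0 := by
        rw [List.countP_eq_zero]
        intro c hc
        have : a ≤ c := ha c hc
        simp; omega
      cases j with
      | zero => simp [hax, hcnt0]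
      | succ j =>
        have hjt : j < t.length := by simpa using hj
        have hac : a ≤ t[j] := ha _ (List.getElem_mem hjt)
        simp [hax, hcnt0]; omega

-- The interval-scan loop (with its 'bin num_groups' fallback) produces the count of cutoffs ≤ x.
lemma loop_eq_count (x : Int) (s : List Int) (hp : s.Pairwise (· ≤ ·)) :
    ∀ (k j : Nat), 1 ≤ j → j ≤ s.length → j ≤ s.countP (fun c => decide (c ≤ x)) →
      s.length - j ≤ k →
      (match value2binLoop s x (PySem.List.pyRange (j : Int) (s.length : Int)) with
       | some r => r
       | none => "bin" ++ PySem.Int.toStr (s.length : Int))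
      = "bin" ++ PySem.Int.toStr ((s.countP (fun c => decide (c ≤ x)) : Int)) := by
  intro k
  induction k with
  | zero =>
    intro j h1 hn hc hk
    have hj : j = s.length := by omega
    have hcnt : s.countP (fun c => decide (c ≤ x)) = s.length := by
      have := List.countP_le_length (p := fun c => decide (c ≤ x)) (l := s)
      omega
    rw [PySem.List.pyRange_one_eq_nil (by omega)]
    simp [value2binLoop, hcnt]
  | succ k ih =>
    intro j h1 hn hc hk
    by_cases hjn : j = s.length
    · have hcnt : s.countP (fun c => decide (c ≤ x)) = s.length := by
        have := List.countP_le_length (p := fun c => decide (c ≤ x)) (l := s)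
        omega
      rw [PySem.List.pyRange_one_eq_nil (by omega)]
      simp [value2binLoop, hcnt]
    · have hjlt : j < s.length := by omega
      rw [PySem.List.pyRange_one_cons (by exact_mod_cast hjlt)]
      have hg1 : PySem.List.pyGetD s ((j : Int) - 1) 0 = s[j - 1]'(by omega) := by
        rw [PySem.List.pyGetD_eq_getElem s 0 (by omega) (by omega)]
        congr 1
        omega
      have hg2 : PySem.List.pyGetD s (j : Int) 0 = s[j]'hjlt := by
        rw [PySem.List.pyGetD_eq_getElem s 0 (by omega) (by omega)]
        congr 1
      have hiff1 := sorted_le_iff_lt_countP x s hp (j - 1) (by omega)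
      have hiff2 := sorted_le_iff_lt_countP x s hp j hjlt
      have hle1 : s[j - 1]'(by omega) ≤ x := hiff1.mpr (by omega)
      by_cases hcnt : s.countP (fun c => decide (c ≤ x)) ≤ j
      · -- count = j: this is the interval, the loop returns 'bin j'
        have hlt2 : x < s[j]'hjlt := by
          by_contra h
          have := hiff2.mp (by omega)
          omega
        have hcj : s.countP (fun c => decide (c ≤ x)) = j := by omega
        simp only [value2binLoop, hg1, hg2]
        rw [if_pos ⟨hle1, hlt2⟩, hcj]
      · -- count > j: condition false (x ≥ s[j]); continue with j + 1
        have hle2 : s[j]'hjlt ≤ x := hiff2.mpr (by omega)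
        simp only [value2binLoop, hg1, hg2]
        rw [if_neg (by omega)]
        have := ih (j + 1) (by omega) (by omega) (by omega) (by omega)
        exact_mod_cast this

theorem value2bin_spec : Claim_equal_value2bin := by
  intro x cutoffs _dom hpre
  unfold Spec_value2bin value2bin value2bin_alt
  set s := PySem.List.sorted cutoffs (fun c => c) false with hsdef
  have hsne : s ≠ [] := by
    rw [hsdef, Ne, PySem.List.sorted_eq_nil_iff]
    exact hpre
  obtain ⟨c0, t, hs⟩ := List.exists_cons_of_ne_nil hsne
  obtain ⟨m, hm⟩ : ∃ m, PySem.List.min? cutoffs (fun c => c) = some m := by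
    cases hmin : PySem.List.min? cutoffs (fun c => c) with
    | none => exact absurd ((PySem.List.min?_eq_none_iff _ _).mp hmin) hpre
    | some m => exact ⟨m, rfl⟩
  have hmc0 : m = c0 := by
    have h1 : m ≤ c0 :=
      PySem.List.min?_isMin hm c0 ((PySem.List.mem_sorted cutoffs (fun c => c) false c0).mp
        (by rw [← hsdef, hs]; exact List.mem_cons_self))
    have h2 : c0 ≤ m :=
      PySem.List.key_head_sorted_le cutoffs (fun c => c) (by rw [← hsdef]; exact hs) m
        (PySem.List.min?_mem hm)
    omega
  have hget : PySem.List.pyGet? s 0 = some c0 := by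
    rw [hs]; simp [PySem.List.pyGet?, PySem.List.pyIdx?]
  have hcntP : cutoffs.countP (fun c => decide (c ≤ x)) = s.countP (fun c => decide (c ≤ x)) :=
    (List.Perm.countP_eq _ (PySem.List.sorted_perm cutoffs (fun c => c) false)).symm
  have hp : s.Pairwise (· ≤ ·) := PySem.List.sorted_pairwise cutoffs (fun c => c)
  simp only [hget, hm, hmc0]
  by_cases hx : x < c0
  · simp [hx]
  · rw [if_neg hx, if_neg hx]
    have hlen : 1 ≤ s.length := by rw [hs]; simp
    have hc1 : 1 ≤ s.countP (fun c => decide (c ≤ x)) := by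
      have h0 : s[0]'(by omega) ≤ x := by
        have he : s[0]'(by omega) = c0 := by simp [hs]
        omega
      have := (sorted_le_iff_lt_countP x s hp 0 (by omega)).mp h0
      omega
    have := loop_eq_count x s hp s.length 1 le_rfl hlen hc1 (by omega)
    rw [hcntP]
    exact_mod_cast this
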